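-- pv_equiv track=rewrite | github.com/quilteno/First-Repository | word/word.py | serch
-- ===== SOURCE A (Python) =====
-- def serch(zi, mu):
--     len1 = len(zi)
--     pl = 20
--     for i in range(len(mu)):
--         if mu[i:i + len1] == zi:
--             pl = i
--             break
--     return pl
-- ===== SOURCE B (Python) =====
-- def serch(zi, mu):
--     n, m = len(mu), len(zi)
--     i = j = 0
--     while i < n:
--         if j >= m:
--             return i - j
--         if mu[i] == zi[j]:
--             i += 1
--             j += 1
--         else:
--             i += 1 - j
--             j = 0
--     if j == m and m > 0:
--         return n - m
--     return 20
-- ===== Notes on version B (the rewrite author's own statement) =====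
-- stated objective: faster
-- what changed: Replaces A's per-position slice construction and slice comparison with a single two-pointer character scan (text cursor i, pattern cursor j, backtracking to match-start+1 on mismatch) that never builds a substring and returns the moment the pattern is fully matched.
import Mathlib
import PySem

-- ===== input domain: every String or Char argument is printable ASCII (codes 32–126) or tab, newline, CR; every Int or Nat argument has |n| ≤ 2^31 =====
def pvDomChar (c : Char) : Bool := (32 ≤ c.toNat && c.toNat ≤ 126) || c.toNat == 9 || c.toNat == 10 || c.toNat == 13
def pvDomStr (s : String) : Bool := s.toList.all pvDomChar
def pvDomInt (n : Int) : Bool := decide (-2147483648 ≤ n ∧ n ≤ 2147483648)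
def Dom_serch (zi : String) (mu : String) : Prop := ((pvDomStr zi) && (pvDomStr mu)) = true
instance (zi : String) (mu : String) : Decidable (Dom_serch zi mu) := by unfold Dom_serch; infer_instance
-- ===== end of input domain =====

-- B replaces A's per-index slice-and-compare loop with a two-pointer character scan
-- that backtracks to match-start+1 on a mismatch (objective: alternative algorithm, no slicing).


-- ===== PORT A =====
-- the for-loop with break: scan the range list, return i at the first slice match, else pl = 20
def serchGo (zi : String) (mu : String) (len1 : Int) : List Int → Int
  | [] => 20
  | i :: rest =>
      if PySem.Str.slice mu (some i) (some (i + len1)) = zi then i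
      else serchGo zi mu len1 rest

def serch (zi : String) (mu : String) : Int :=
  let len1 : Int := PySem.Str.len zi
  serchGo zi mu len1 (PySem.List.pyRange 0 (PySem.Str.len mu) 1)

-- ===== PORT B =====
-- two-pointer scan: i is the text cursor, j the pattern cursor (hj : j ≤ i is the loop
-- invariant needed only for termination; the match start is i - j)
def serchAltGo (mu : List Char) (zi : List Char) (i j : Nat) (hj : j ≤ i) : Int :=
  if hi : i < mu.length then
    if j ≥ zi.length then (i : Int) - (j : Int)
    else if mu[i]? = zi[j]? then serchAltGo mu zi (i + 1) (j + 1) (by omega)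
    else serchAltGo mu zi (i + 1 - j) 0 (by omega)
  else
    if j = zi.length ∧ 0 < zi.length then (mu.length : Int) - (zi.length : Int) else 20
termination_by ((mu.length + 1 - (i - j)) * (zi.length + 1) + (zi.length - j))
decreasing_by
  · rw [Nat.succ_sub_succ]; omega
  · have h1 : (mu.length + 1 - (i + 1 - j - 0)) + 1 ≤ mu.length + 1 - (i - j) := by omega
    have h2 : ((mu.length + 1 - (i + 1 - j - 0)) + 1) * (zi.length + 1)
        ≤ (mu.length + 1 - (i - j)) * (zi.length + 1) := Nat.mul_le_mul_right _ h1
    have h3 : ((mu.length + 1 - (i + 1 - j - 0)) + 1) * (zi.length + 1)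
        = (mu.length + 1 - (i + 1 - j - 0)) * (zi.length + 1) + zi.length + 1 := by ring
    omega

def serch_alt (zi : String) (mu : String) : Int :=
  serchAltGo mu.toList zi.toList 0 0 (Nat.le_refl 0)

-- ===== PRECONDITION & SPEC =====
def Spec_serch (zi : String) (mu : String) (out : Int) : Prop := out = serch_alt zi mu
instance (zi : String) (mu : String) (out : Int) : Decidable (Spec_serch zi mu out) := by unfold Spec_serch; infer_instance

-- ===== CLAIM (what is proved, stated in full; the proofs are below) =====
def Claim_equal_serch : Prop := ∀ (zi : String) (mu : String), Dom_serch zi mu → Spec_serch zi mu (serch zi mu)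

-- ===== LEMMAS AND PROOFS =====

-- reference function: first index t ≥ s (t < |mu|) whose length-|zi| window equals zi, else 20
def firstFrom (mu : List Char) (zi : List Char) (s : Nat) : Int :=
  if s < mu.length then
    if (mu.drop s).take zi.length = zi then (s : Int) else firstFrom mu zi (s + 1)
  else 20
termination_by mu.length - s

-- A's slice test at index k is the windowed list equality
lemma slice_cond (zi mu : String) (k : Nat) :
    PySem.Str.slice mu (some (k : Int)) (some ((k : Int) + PySem.Str.len zi)) = zi
      ↔ (mu.toList.drop k).take zi.toList.length = zi.toList := by
  rw [← String.toList_inj, PySem.Str.toList_slice, PySem.Chars.slice_eq_listSlice,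
      PySem.Str.len_eq, PySem.List.slice_natCast_add]

lemma serchGo_eq_firstFrom (zi mu : String) (k : Nat) (hk : k ≤ mu.toList.length) :
    serchGo zi mu (PySem.Str.len zi) (PySem.List.pyRange k (PySem.Str.len mu) 1)
      = firstFrom mu.toList zi.toList k := by
  have hlen : PySem.Str.len mu = (mu.toList.length : Int) := PySem.Str.len_eq mu
  have H : ∀ (d k : Nat), mu.toList.length - k = d → k ≤ mu.toList.length →
      serchGo zi mu (PySem.Str.len zi) (PySem.List.pyRange k (PySem.Str.len mu) 1)
        = firstFrom mu.toList zi.toList k := by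
    intro d
    induction d with
    | zero =>
      intro k hd hk
      have hk' : k = mu.toList.length := by omega
      rw [PySem.List.pyRange_one_eq_nil (by rw [hlen]; exact_mod_cast le_of_eq hk'.symm)]
      rw [firstFrom]
      simp [serchGo, hk']
    | succ d ih =>
      intro k hd hk
      have hklt : k < mu.toList.length := by omega
      rw [PySem.List.pyRange_one_cons (by rw [hlen]; exact_mod_cast hklt)]
      simp only [serchGo]
      rw [firstFrom, if_pos hklt]
      by_cases hc : (mu.toList.drop k).take zi.toList.length = zi.toList
      · rw [if_pos ((slice_cond zi mu k).mpr hc), if_pos hc]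
      · rw [if_neg (fun h => hc ((slice_cond zi mu k).mp h)), if_neg hc]
        have hcast : ((k : Int) + 1) = ((k + 1 : Nat) : Int) := by push_cast; ring
        rw [hcast, ih (k + 1) (by omega) (by omega)]
  exact H (mu.toList.length - k) k rfl hk

lemma firstFrom_of_too_big (mu zi : List Char) :
    ∀ (d t : Nat), mu.length - t = d → mu.length < t + zi.length →
      firstFrom mu zi t = 20 := by
  intro d
  induction d with
  | zero =>
    intro t hd h
    rw [firstFrom]
    have ht : ¬ t < mu.length := by omega
    simp [ht]
  | succ d ih =>
    intro t hd h
    rw [firstFrom]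
    have hc : ¬ (mu.drop t).take zi.length = zi := by
      intro heq
      have := congrArg List.length heq
      simp [List.length_take, List.length_drop] at this
      omega
    simp only [if_neg hc]
    split
    · exact ih (t + 1) (by omega) (by omega)
    · rfl

lemma serchAltGo_eq_firstFrom (mu zi : List Char) :
    ∀ (fuel i j : Nat) (hj : j ≤ i),
      (mu.length + 1 - (i - j)) * (zi.length + 1) + (zi.length - j) ≤ fuel →
      i ≤ mu.length → j ≤ zi.length →
      (mu.drop (i - j)).take j = zi.take j →
      serchAltGo mu zi i j hj = firstFrom mu zi (i - j) := by
  intro fuel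
  induction fuel with
  | zero =>
    intro i j hj hfuel hi hjm hpref
    exfalso
    have h1 : 1 ≤ mu.length + 1 - (i - j) := by omega
    have h2 := Nat.mul_le_mul_right (zi.length + 1) h1
    omega
  | succ fuel ih =>
    intro i j hj hfuel hi hjm hpref
    rw [serchAltGo]
    by_cases hilt : i < mu.length
    · rw [dif_pos hilt]
      by_cases hjge : j ≥ zi.length
      · have hjz : j = zi.length := le_antisymm hjm hjge
        rw [if_pos hjge, firstFrom, if_pos (show i - j < mu.length by omega),
            if_pos (by rw [← hjz, hpref, hjz, List.take_length])]
        omega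
      · rw [if_neg hjge]
        have hjlt : j < zi.length := by omega
        by_cases hch : mu[i]? = zi[j]?
        · rw [if_pos hch]
          have hidx : (i + 1) - (j + 1) = i - j := by omega
          have hpref' : (mu.drop ((i + 1) - (j + 1))).take (j + 1) = zi.take (j + 1) := by
            rw [hidx, List.take_add_one, List.take_add_one, hpref, List.getElem?_drop,
                show i - j + j = i by omega, hch]
          have hm1 : (mu.length + 1 - ((i + 1) - (j + 1))) * (zi.length + 1)
              + (zi.length - (j + 1)) ≤ fuel := by rw [hidx]; omega
          rw [ih (i + 1) (j + 1) (by omega) hm1 (by omega) (by omega) hpref', hidx]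
        · rw [if_neg hch]
          have h1 : (mu.length + 1 - (i + 1 - j)) + 1 ≤ mu.length + 1 - (i - j) := by omega
          have h2 := Nat.mul_le_mul_right (zi.length + 1) h1
          have h3 : ((mu.length + 1 - (i + 1 - j)) + 1) * (zi.length + 1)
              = (mu.length + 1 - (i + 1 - j)) * (zi.length + 1) + zi.length + 1 := by ring
          have hcfail : ¬ (mu.drop (i - j)).take zi.length = zi := by
            intro heq
            apply hch
            have h4 : zi[j]? = ((mu.drop (i - j)).take zi.length)[j]? := by rw [heq]
            rw [List.getElem?_take_of_lt hjlt, List.getElem?_drop,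
                show i - j + j = i by omega] at h4
            exact h4.symm
          have hstep : firstFrom mu zi (i - j) = firstFrom mu zi (i - j + 1) := by
            rw [firstFrom, if_pos (show i - j < mu.length by omega), if_neg hcfail]
          rw [ih (i + 1 - j) 0 (by omega) (by simp only [Nat.sub_zero]; omega)
                (by omega) (Nat.zero_le _) (by simp),
              Nat.sub_zero, show i + 1 - j = i - j + 1 by omega]
          exact hstep.symm
    · rw [dif_neg hilt]
      have hieq : i = mu.length := by omega
      by_cases hfin : j = zi.length ∧ 0 < zi.length
      · obtain ⟨hjz, hmpos⟩ := hfin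
        rw [if_pos ⟨hjz, hmpos⟩, firstFrom, if_pos (show i - j < mu.length by omega),
            if_pos (by rw [← hjz, hpref, hjz, List.take_length])]
        omega
      · rw [if_neg hfin]
        by_cases hm0 : zi.length = 0
        · have hj0 : j = 0 := by omega
          rw [firstFrom, if_neg (show ¬ i - j < mu.length by omega)]
        · have hjlt : j < zi.length := by
            rcases Nat.lt_or_ge j zi.length with h | h
            · exact h
            · exact absurd ⟨le_antisymm hjm h, by omega⟩ hfin
          exact (firstFrom_of_too_big mu zi (mu.length - (i - j)) (i - j) rfl
            (by omega)).symm

-- ===== VERDICT (by name: the statement is the Claim_ definition above) =====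
theorem serch_spec : Claim_equal_serch := by
  intro zi mu _
  unfold Spec_serch serch serch_alt
  show serchGo zi mu (PySem.Str.len zi) (PySem.List.pyRange 0 (PySem.Str.len mu) 1)
      = serchAltGo mu.toList zi.toList 0 0 (Nat.le_refl 0)
  have hA := serchGo_eq_firstFrom zi mu 0 (Nat.zero_le _)
  have hB := serchAltGo_eq_firstFrom mu.toList zi.toList
      ((mu.toList.length + 1) * (zi.toList.length + 1) + zi.toList.length) 0 0
      (Nat.le_refl 0)
      (by simp)
      (Nat.zero_le _) (Nat.zero_le _) (by simp)
  simp only [Nat.cast_zero] at hA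
  simp only [Nat.sub_zero] at hB
  rw [hA, hB]
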